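-- pv_equiv track=rewrite | github.com/askiki12/24_SE1 | 软件工程与计算/作业/python/lab06_no_test/src/test27.py | sphinx_swap
-- ===== SOURCE A (Python) =====
-- def sphinx_swap(start, goal, limit):
--     """A diff function for autocorrect that determines how many letters
--     in START need to be substituted to create GOAL, then adds the difference in
--     their lengths.
--
--     >>> big_limit = 10
--     >>> sphinx_swap("car", "cad", big_limit)
--     1
--     >>> sphinx_swap("this", "that", big_limit)
--     2
--     >>> sphinx_swap("one", "two", big_limit)
--     3
--     >>> sphinx_swap("awful", "awesome", 3) > 3
--     True
--     >>> sphinx_swap("awful", "awesome", 4) > 4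
--     True
--     >>> from construct_check import check
--     >>> # ban while or for loops
--     >>> check(HW_SOURCE_FILE, 'missing_digits', ['While', 'For'])
--     True
--     """
--     # BEGIN PROBLEM 6
--     num = 0
--     if len(goal)==0:
--         return len(start)
--     if len(start)==0:
--         return len(goal)
--     if start[0] != goal[0]:
--         return 1+sphinx_swap(start[1:],goal[1:],limit)
--     return sphinx_swap(start[1:],goal[1:],limit)
-- ===== SOURCE B (Python) =====
-- def sphinx_swap(start, goal, limit):
--     count = abs(len(start) - len(goal))
--     for i in range(min(len(start), len(goal))):
--         if start[i] != goal[i]: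
--             count += 1
--     return count
-- ===== Notes on version B (the rewrite author's own statement) =====
-- stated objective: faster
-- what changed: Replaced A's linear recursion on string tails (which re-slices both strings at every step) by a closed-form length-difference term plus one explicit index loop over the common prefix.
import Mathlib
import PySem

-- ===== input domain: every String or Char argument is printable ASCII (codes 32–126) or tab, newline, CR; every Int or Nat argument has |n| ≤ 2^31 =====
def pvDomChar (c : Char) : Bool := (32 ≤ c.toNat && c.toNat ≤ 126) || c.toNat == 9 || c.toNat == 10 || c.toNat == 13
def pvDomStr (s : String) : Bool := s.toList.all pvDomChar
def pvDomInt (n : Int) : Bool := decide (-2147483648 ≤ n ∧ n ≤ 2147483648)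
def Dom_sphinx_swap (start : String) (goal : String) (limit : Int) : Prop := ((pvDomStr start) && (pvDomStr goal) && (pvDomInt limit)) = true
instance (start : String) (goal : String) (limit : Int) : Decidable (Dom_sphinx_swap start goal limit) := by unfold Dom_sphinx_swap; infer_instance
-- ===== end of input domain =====

-- B replaces A's tail recursion (with slicing) by |len start - len goal| plus one explicit index loop; return value only (neither mutates).

-- ===== PORT A =====
-- A's recursion on the two strings' characters; branch order as in the Python.
def sphinxA : List Char → List Char → Int
  | s, [] => (s.length : Int)
  | [], g => (g.length : Int)
  | a :: s', b :: g' => if a ≠ b then 1 + sphinxA s' g' else sphinxA s' g'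

def sphinx_swap (start : String) (goal : String) (_limit : Int) : Int :=
  sphinxA start.toList goal.toList

-- ===== PORT B =====
def sphinx_swap_alt (start : String) (goal : String) (_limit : Int) : Int :=
  let s := start.toList
  let g := goal.toList
  let count : Int := |(s.length : Int) - (g.length : Int)|
  (List.range (min s.length g.length)).foldl
    (fun c i => if s[i]? ≠ g[i]? then c + 1 else c) count

-- ===== PRECONDITION & SPEC =====
def Spec_sphinx_swap (start : String) (goal : String) (limit : Int) (out : Int) : Prop := out = sphinx_swap_alt start goal limit
instance (start : String) (goal : String) (limit : Int) (out : Int) : Decidable (Spec_sphinx_swap start goal limit out) := by unfold Spec_sphinx_swap; infer_instance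

-- ===== CLAIM (what is proved, stated in full; the proofs are below) =====
def Claim_equal_sphinx_swap : Prop := ∀ (start : String) (goal : String) (limit : Int), Dom_sphinx_swap start goal limit → Spec_sphinx_swap start goal limit (sphinx_swap start goal limit)

-- ===== LEMMAS AND PROOFS =====

-- Loop invariant: B's index loop adds the mismatch count of the common prefix,
-- which is A's value minus the length-difference term.
lemma sphinx_loop (s : List Char) : ∀ (g : List Char) (c : Int),
    (List.range (min s.length g.length)).foldl
      (fun c i => if s[i]? ≠ g[i]? then c + 1 else c) c
    = c + sphinxA s g - |(s.length : Int) - (g.length : Int)| := by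
  induction s with
  | nil =>
    intro g c
    cases g with
    | nil => simp [sphinxA]
    | cons b g' =>
      simp [sphinxA, abs_of_nonpos]
  | cons a s' ih =>
    intro g c
    cases g with
    | nil =>
      simp [sphinxA]
      rw [abs_of_nonneg (by positivity)]
      ring
    | cons b g' =>
      have hmin : min (a :: s').length (b :: g').length = min s'.length g'.length + 1 := by
        simp [List.length_cons]
      rw [hmin, List.range_succ_eq_map, List.foldl_cons, List.foldl_map]
      have habs : |((a :: s').length : Int) - ((b :: g').length : Int)|
          = |(s'.length : Int) - (g'.length : Int)| := by
        simp only [List.length_cons]; congr 1; push_cast; ring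
      simp only [List.getElem?_cons_succ, List.getElem?_cons_zero, Nat.succ_eq_add_one]
      refine (ih g' _).trans ?_
      rw [habs]
      by_cases h : a = b
      · simp [sphinxA, h]
      · have hne : (some a ≠ some b) := by simp [h]
        simp [sphinxA, h, hne]
        ring

theorem sphinx_swap_spec : Claim_equal_sphinx_swap := by
  intro start goal limit _
  unfold Spec_sphinx_swap sphinx_swap sphinx_swap_alt
  rw [sphinx_loop]
  ring
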